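-- pv_equiv track=rewrite | github.com/juhwang8378/emoji-ranking | bot.py | format_vertical_graph
-- ===== SOURCE A (Python) =====
-- import math
--
-- def format_vertical_graph(pairs: list[tuple[str, int]], height: int = 10) -> str:
--     if not pairs:
--         return "(데이터가 없습니다)"
--
--     max_count = max(count for _, count in pairs)
--     if max_count == 0:
--         return "(데이터가 없습니다)"
--
--     scaled_heights = [max(1, math.ceil(count / max_count * height)) for _, count in pairs]
--     lines: list[str] = []
--     for level in range(height, 0, -1):
--         row = []
--         for column_height in scaled_heights:
--             row.append("  █  " if column_height >= level else "     ")
--         lines.append("".join(row))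
--
--     labels = "".join(f" {name}  " for name, _ in pairs)
--     counts = "".join(f" {count:^3} " for _, count in pairs)
--     lines.append(labels)
--     lines.append(counts)
--     return "\n".join(lines)
-- ===== SOURCE B (Python) =====
-- import math
--
-- def _mid3(s: str) -> str:
--     # center in width 3 like f"{s:^3}": grow by one space on the right, then one
--     # on the left, alternately, until width 3
--     while len(s) < 3:
--         s = s + " "
--         if len(s) < 3:
--             s = " " + s
--     return s
--
-- def format_vertical_graph(pairs: list[tuple[str, int]], height: int = 10) -> str:
--     # Column-major: one vertical strip per entry, built bottom-up and flipped,
--     # footer cells appended to the strip; the strips are transposed into rows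
--     # and the final text is accumulated with an explicit running string.
--     if not pairs:
--         return "(데이터가 없습니다)"
--
--     top = pairs[0][1]
--     for _, c in pairs[1:]:
--         if c > top:
--             top = c
--     if top == 0:
--         return "(데이터가 없습니다)"
--
--     columns = []
--     for name, count in pairs:
--         bar = max(1, math.ceil(count / top * height))
--         strip = ["  █  " if r < bar else "     " for r in range(height)]
--         strip.reverse()
--         columns.append(strip + [" " + name + "  ", " " + _mid3(str(count)) + " "])
--
--     return "\n".join("".join(row) for row in zip(*columns))
-- ===== Notes on version B (the rewrite author's own statement) =====
-- stated objective: alternative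
-- what changed: B builds the chart column-major — the maximum found by an explicit loop, one vertical strip per entry built bottom-up and flipped with its label and count footer cells appended, a hand-rolled alternating-pad centering — and transposes the strips with zip(*columns) into the output rows, instead of A's row-by-row scans over a precomputed scaled_heights list followed by separately assembled footer lines.
import Mathlib
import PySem

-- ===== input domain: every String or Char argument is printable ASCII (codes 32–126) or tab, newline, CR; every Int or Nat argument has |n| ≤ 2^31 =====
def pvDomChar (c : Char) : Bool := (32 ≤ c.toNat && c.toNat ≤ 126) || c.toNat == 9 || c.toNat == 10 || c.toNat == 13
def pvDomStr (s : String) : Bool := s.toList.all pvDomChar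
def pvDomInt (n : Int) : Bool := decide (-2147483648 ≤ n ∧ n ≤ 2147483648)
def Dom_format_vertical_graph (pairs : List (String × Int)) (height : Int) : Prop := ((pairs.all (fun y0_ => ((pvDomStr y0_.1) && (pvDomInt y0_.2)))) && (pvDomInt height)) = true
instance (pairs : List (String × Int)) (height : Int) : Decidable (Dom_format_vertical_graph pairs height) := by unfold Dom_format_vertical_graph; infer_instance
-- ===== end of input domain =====

-- B rebuilds the chart column-major: one vertical strip per entry built bottom-up and
-- flipped, the max found by an explicit loop, the footer cells part of each strip, then a
-- transpose into rows whose cells are concatenated one by one; objective: alternative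
-- decomposition, same cost.  Return values are proved equal on Dom.

-- ===== PORT A =====

-- Exact model of the IEEE-754 binary64 value of Python's `count / max_count * height`
-- (division correctly rounded to nearest-even, then multiplication by the exactly
-- representable int `height`, again rounded), followed by math.ceil.  Exact for the
-- normal range reached under Dom (|ints| ≤ 2^31: no overflow, no subnormals).
-- `b * 2^e ≤ a` for a b : Nat, e : Int
def pvLe2Pow (b : Nat) (e : Int) (a : Nat) : Bool :=
  if 0 ≤ e then b <<< e.toNat ≤ a else b ≤ a <<< (-e).toNat

-- round num/den (den > 0) to nearest binary64, ties to even; returns (m, e) with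
-- value = m * 2^(e-52), |m| ∈ [2^52, 2^53] for nonzero input
def pvRoundQ (num den : Int) : Int × Int :=
  if num = 0 then (0, 0)
  else
    let s : Int := if num < 0 then -1 else 1
    let a : Nat := num.natAbs
    let b : Nat := den.toNat
    let g : Int := (PySem.Int.bitLength (a : Int) : Int) - (PySem.Int.bitLength (b : Int) : Int)
    let e : Int := if pvLe2Pow b g a then g else g - 1
    let sft : Int := 52 - e
    let nd : Nat × Nat := if 0 ≤ sft then (a <<< sft.toNat, b) else (a, b <<< (-sft).toNat)
    let q : Nat := nd.1 / nd.2
    let r : Nat := nd.1 % nd.2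
    let m : Nat := if 2 * r < nd.2 then q else if nd.2 < 2 * r then q + 1
                   else if q % 2 = 0 then q else q + 1
    (s * (m : Int), e)

-- max(1, math.ceil(c / maxc * h))  computed exactly (maxc ≠ 0)
def pvCeilScaled (c maxc h : Int) : Int :=
  let nd1 : Int × Int := if maxc < 0 then (-c, -maxc) else (c, maxc)
  let me1 := pvRoundQ nd1.1 nd1.2
  let nd2 : Int × Int :=
    if me1.2 ≤ 52 then (me1.1 * h, ((1 : Int) <<< (52 - me1.2).toNat))
    else (me1.1 * h * ((1 : Int) <<< (me1.2 - 52).toNat), 1)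
  let me2 := pvRoundQ nd2.1 nd2.2
  let v : Int :=
    if 52 ≤ me2.2 then me2.1 * ((1 : Int) <<< (me2.2 - 52).toNat)
    else -(Int.fdiv (-me2.1) ((1 : Int) <<< (52 - me2.2).toNat))
  max 1 v

-- f" {count:^3} " : str(count) centered in width 3 (extra space on the right)
def pvCenter3 (s : String) : String :=
  let cs := s.toList
  let n := cs.length
  if 3 ≤ n then s
  else
    let left := (3 - n) / 2
    String.ofList (List.replicate left ' ' ++ cs ++ List.replicate (3 - n - left) ' ')

def format_vertical_graph (pairs : List (String × Int)) (height : Int) : String :=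
  match pairs with
  | [] => "(데이터가 없습니다)"
  | _ :: _ =>
    let maxc := (PySem.List.max? (pairs.map (fun p => p.2)) (fun x => x)).getD 0
    if maxc = 0 then "(데이터가 없습니다)"
    else
      let scaled := pairs.map (fun p => pvCeilScaled p.2 maxc height)
      let lines := (PySem.List.pyRange height 0 (-1)).map (fun level =>
        PySem.Str.join "" (scaled.map (fun ch => if ch ≥ level then "  █  " else "     ")))
      let labels := PySem.Str.join "" (pairs.map (fun p => " " ++ p.1 ++ "  "))
      let counts := PySem.Str.join "" (pairs.map (fun p => " " ++ pvCenter3 (PySem.Int.toStr p.2) ++ " "))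
      PySem.Str.join "\n" (lines ++ [labels, counts])

-- ===== PORT B =====

-- _mid3: widen to 3 by appending a space, then prepending one, alternately (the while
-- loop runs at most twice, so fuel 3 is exact)
def pvMid3Go : Nat → List Char → List Char
  | 0, s => s
  | fuel + 1, s =>
    if s.length < 3 then
      let s1 := s ++ [' ']
      let s2 := if s1.length < 3 then ' ' :: s1 else s1
      pvMid3Go fuel s2
    else s

def pvMid3 (s : String) : String := String.ofList (pvMid3Go 3 s.toList)

-- zip(*columns): heads row, then recurse on tails; stops when any list is exhausted.
-- Fuel = length of the first list (zip never yields more rows than that), structural.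
def pvTransposeN {α : Type} : Nat → List (List α) → List (List α)
  | 0, _ => []
  | fuel + 1, ls =>
    if ls ≠ [] ∧ ∀ l ∈ ls, l ≠ [] then
      (ls.filterMap List.head?) :: pvTransposeN fuel (ls.map List.tail)
    else []

def pvTranspose {α : Type} (ls : List (List α)) : List (List α) :=
  pvTransposeN (ls.headD []).length ls

def format_vertical_graph_alt (pairs : List (String × Int)) (height : Int) : String :=
  match pairs with
  | [] => "(데이터가 없습니다)"
  | p :: ps =>
    let top := ps.foldl (fun t q => if q.2 > t then q.2 else t) p.2
    if top = 0 then "(데이터가 없습니다)"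
    else
      let columns := (p :: ps).map (fun y =>
        let bar := pvCeilScaled y.2 top height
        ((List.range height.toNat).map
            (fun (r : Nat) => if (r : Int) < bar then "  █  " else "     ")).reverse
          ++ [" " ++ y.1 ++ "  ", " " ++ pvMid3 (PySem.Int.toStr y.2) ++ " "])
      PySem.Str.join "\n" ((pvTranspose columns).map (fun row => PySem.Str.join "" row))

-- ===== PRECONDITION & SPEC =====
def Spec_format_vertical_graph (pairs : List (String × Int)) (height : Int) (out : String) : Prop := out = format_vertical_graph_alt pairs height
instance (pairs : List (String × Int)) (height : Int) (out : String) : Decidable (Spec_format_vertical_graph pairs height out) := by unfold Spec_format_vertical_graph; infer_instance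

-- ===== CLAIM (what is proved, stated in full; the proofs are below) =====
def Claim_equal_format_vertical_graph : Prop := ∀ (pairs : List (String × Int)) (height : Int), Dom_format_vertical_graph pairs height → Spec_format_vertical_graph pairs height (format_vertical_graph pairs height)

-- ===== LEMMAS AND PROOFS =====

theorem pv_max_cons_cons (x y : Int) (l : List Int) :
    PySem.List.max? (x :: y :: l) (fun v => v)
      = PySem.List.max? ((if x < y then y else x) :: l) (fun v => v) := by
  simp only [PySem.List.max?, List.foldl_cons]
  congr 1
  split <;> rfl

theorem pv_max_run (l : List Int) : ∀ (a : Int),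
    (PySem.List.max? (a :: l) (fun v => v)).getD 0
      = l.foldl (fun t q => if q > t then q else t) a := by
  induction l with
  | nil => intro a; rfl
  | cons x t ih =>
    intro a
    rw [pv_max_cons_cons, ih, List.foldl_cons]

theorem pv_mid3_eq_center3 (s : String) : pvMid3 s = pvCenter3 s := by
  unfold pvMid3 pvCenter3
  match h : s.toList with
  | [] => simp [pvMid3Go]
  | [a] => simp [pvMid3Go]
  | [a, b] => simp [pvMid3Go]
  | a :: b :: c :: t =>
    have h3 : ¬ (a :: b :: c :: t).length < 3 := by simp
    have hn : 3 ≤ (a :: b :: c :: t).length := by simp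
    simp only [pvMid3Go, if_neg h3, if_pos hn]
    rw [← h, String.ofList_toList]

theorem pv_reverse_map_range {β : Type} (n : Nat) (f : Nat → β) :
    ((List.range n).map f).reverse = (List.range n).map (fun t => f (n - 1 - t)) := by
  apply List.ext_getElem
  · simp
  · intro i h1 h2
    simp only [List.length_map, List.length_range] at h1 h2
    simp only [List.getElem_reverse, List.getElem_map, List.getElem_range,
      List.length_map, List.length_range]

theorem pvTransposeN_map_cons {α β : Type} (fuel : Nat) (l : List α) (hl : l ≠ [])
    (f : α → β) (g : α → List β) :
    pvTransposeN (fuel + 1) (l.map (fun x => f x :: g x))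
      = l.map f :: pvTransposeN fuel (l.map g) := by
  simp only [pvTransposeN]
  rw [if_pos (by
    refine ⟨by simp [hl], ?_⟩
    intro l' hl'
    simp only [List.mem_map] at hl'
    obtain ⟨x, _, rfl⟩ := hl'
    simp)]
  congr 1
  · simp [List.filterMap_map, Function.comp]
  · rw [List.map_map]
    apply congrArg
    apply List.map_congr_left
    intro x _
    rfl

theorem pvTransposeN_range_append {α β : Type} (n : Nat) (l : List α) (hl : l ≠ [])
    (c : α → Nat → β) (f1 f2 : α → β) :
    pvTransposeN (n + 2) (l.map (fun x => (List.range n).map (c x) ++ [f1 x, f2 x]))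
      = (List.range n).map (fun t => l.map (fun x => c x t)) ++ [l.map f1, l.map f2] := by
  induction n generalizing c with
  | zero =>
    have h1 := pvTransposeN_map_cons 1 l hl f1 (fun x => [f2 x])
    have h2 := pvTransposeN_map_cons 0 l hl f2 (fun _ => ([] : List β))
    simp only [List.range_zero, List.map_nil, List.nil_append]
    norm_num at h1 h2 ⊢
    rw [h1, h2]
    simp [pvTransposeN]
  | succ n ih =>
    have hcol : (fun x => (List.range (n+1)).map (c x) ++ [f1 x, f2 x])
        = (fun x => c x 0 :: ((List.range n).map (fun t => c x (t+1)) ++ [f1 x, f2 x])) := by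
      funext x
      simp [List.range_succ_eq_map, List.map_map, Function.comp, Nat.succ_eq_add_one]
    rw [hcol, show n + 1 + 2 = (n + 2) + 1 from rfl,
        pvTransposeN_map_cons (n+2) l hl (fun x => c x 0)
          (fun x => (List.range n).map (fun t => c x (t+1)) ++ [f1 x, f2 x]),
        ih (fun x t => c x (t+1))]
    simp [List.range_succ_eq_map, List.map_map, Function.comp, Nat.succ_eq_add_one]

theorem pvTranspose_range_append {α β : Type} (n : Nat) (x : α) (xs : List α)
    (c : α → Nat → β) (f1 f2 : α → β) :
    pvTranspose ((x :: xs).map (fun y => (List.range n).map (c y) ++ [f1 y, f2 y]))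
      = (List.range n).map (fun t => (x :: xs).map (fun y => c y t))
        ++ [(x :: xs).map f1, (x :: xs).map f2] := by
  have hfuel : (((x :: xs).map (fun y => (List.range n).map (c y) ++ [f1 y, f2 y])).headD []).length = n + 2 := by
    simp
  rw [pvTranspose, hfuel]
  exact pvTransposeN_range_append n (x :: xs) (by simp) c f1 f2

theorem format_vertical_graph_eq_alt (pairs : List (String × Int)) (height : Int) :
    format_vertical_graph pairs height = format_vertical_graph_alt pairs height := by
  cases pairs with
  | nil => rfl
  | cons p ps =>
    simp only [format_vertical_graph, format_vertical_graph_alt]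
    have hmax : ((PySem.List.max? ((p :: ps).map (fun p => p.2)) (fun x => x)).getD 0)
        = ps.foldl (fun t q => if q.2 > t then q.2 else t) p.2 := by
      rw [List.map_cons, pv_max_run, List.foldl_map]
    rw [hmax]
    set top := ps.foldl (fun t q => if q.2 > t then q.2 else t) p.2 with htop
    by_cases hz : top = 0
    · rw [if_pos hz, if_pos hz]
    · rw [if_neg hz, if_neg hz]
      have hcols : ((p :: ps).map (fun y =>
            ((List.range height.toNat).map
              (fun (r : Nat) => if (r : Int) < pvCeilScaled y.2 top height then "  █  " else "     ")).reverse
            ++ [" " ++ y.1 ++ "  ", " " ++ pvMid3 (PySem.Int.toStr y.2) ++ " "]))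
          = ((p :: ps).map (fun y =>
            (List.range height.toNat).map
              (fun (t : Nat) => if ((height.toNat - 1 - t : Nat) : Int) < pvCeilScaled y.2 top height
                        then "  █  " else "     ")
            ++ [" " ++ y.1 ++ "  ", " " ++ pvMid3 (PySem.Int.toStr y.2) ++ " "])) := by
        apply List.map_congr_left
        intro y _
        rw [pv_reverse_map_range]
      rw [hcols,
        pvTranspose_range_append height.toNat p ps
          (fun y t => if ((height.toNat - 1 - t : Nat) : Int) < pvCeilScaled y.2 top height
                      then "  █  " else "     ")
          (fun y => " " ++ y.1 ++ "  ")
          (fun y => " " ++ pvMid3 (PySem.Int.toStr y.2) ++ " ")]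
      rw [List.map_append, List.map_map]
      simp only [List.map_cons, List.map_nil]
      rw [PySem.List.pyRange_neg_one]
      simp only [Int.sub_zero, List.map_map]
      refine congrArg (PySem.Str.join "\n") (congrArg₂ (· ++ ·) ?_ ?_)
      · apply List.map_congr_left
        intro k hk
        have hk' : k < height.toNat := List.mem_range.mp hk
        have hcell : ∀ (ch : Int),
            (if ch ≥ height - (k : Int) then "  █  " else "     ")
              = (if ((height.toNat - 1 - k : Nat) : Int) < ch then "  █  " else "     ") := by
          intro ch
          have hc : ((height.toNat - 1 - k : Nat) : Int) = height - 1 - k := by omega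
          rw [hc]
          split_ifs <;> first | rfl | omega
        simp only [Function.comp_apply]
        apply congrArg
        congr 1
        · exact hcell _
        · apply List.map_congr_left
          intro y _
          simp only [Function.comp_apply]
          exact hcell _
      · simp only [pv_mid3_eq_center3]

-- ===== VERDICT (by name: the statement is the Claim_ definition above) =====
theorem format_vertical_graph_spec : Claim_equal_format_vertical_graph := by
  intro pairs height _
  unfold Spec_format_vertical_graph
  exact format_vertical_graph_eq_alt pairs height
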